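-- pv_equiv track=rewrite | github.com/graymastermind/portifolio | python_course_work/WS06/question 3.py | happyQa
-- ===== SOURCE A (Python) =====
-- def happyQa(s):
--     for i in range(len(s)):
--         if s[i] == 'g':
--             if i > 0 and s[i - 1] == 'g':
--                 continue
--             elif i < len(s) - 1 and s[i + 1] == 'g':
--                 continue
--             else:
--                 return False
--     return True
-- ===== SOURCE B (Python) =====
-- def happyQa(s):
--     # collapse s into maximal runs of equal characters, then check every 'g'-run has length >= 2
--     runs = []
--     i = 0
--     n = len(s)
--     while i < n:
--         j = i
--         while j < n and s[j] == s[i]: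
--             j += 1
--         runs.append((s[i], j - i))
--         i = j
--     return all(c != 'g' or k >= 2 for c, k in runs)
-- ===== Notes on version B (the rewrite author's own statement) =====
-- stated objective: alternative
-- what changed: B materializes the string as a list of maximal (char, run-length) runs and then checks every 'g'-run has length >= 2, instead of A's per-index neighbor inspection with early return.
import Mathlib
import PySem

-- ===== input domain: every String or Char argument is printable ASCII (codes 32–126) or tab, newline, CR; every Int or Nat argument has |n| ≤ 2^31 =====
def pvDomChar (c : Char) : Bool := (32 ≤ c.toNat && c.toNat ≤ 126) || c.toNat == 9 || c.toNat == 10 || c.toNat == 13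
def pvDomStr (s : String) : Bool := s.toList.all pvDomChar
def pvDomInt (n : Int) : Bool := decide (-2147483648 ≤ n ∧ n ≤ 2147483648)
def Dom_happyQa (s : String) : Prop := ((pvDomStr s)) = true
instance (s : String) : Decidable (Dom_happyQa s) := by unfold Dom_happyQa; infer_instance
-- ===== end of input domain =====

-- B materializes the string as maximal (char, run-length) runs and checks every 'g'-run has
-- length ≥ 2, instead of A's per-index neighbor inspection; alternative decomposition, same cost.

-- ===== PORT A =====
-- literal port of A's indexed loop; the guarded s[i-1]/s[i+1] accesses use getD (in range under the guards)
def happyQaLoop (l : List Char) (i : Nat) : Bool :=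
  if i < l.length then
    if l.getD i ' ' = 'g' then
      if 0 < i ∧ l.getD (i - 1) ' ' = 'g' then happyQaLoop l (i + 1)
      else if i < l.length - 1 ∧ l.getD (i + 1) ' ' = 'g' then happyQaLoop l (i + 1)
      else false
    else happyQaLoop l (i + 1)
  else true
termination_by l.length - i

def happyQa (s : String) : Bool := happyQaLoop s.toList 0

-- ===== PORT B =====
-- maximal runs of equal characters (Source B's inner while-scan = takeWhile/dropWhile)
def happyQaRuns (l : List Char) : List (Char × Nat) :=
  match l with
  | [] => []
  | c :: rest =>
      (c, (rest.takeWhile (· == c)).length + 1) :: happyQaRuns (rest.dropWhile (· == c))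
termination_by l.length
decreasing_by
  simp only [List.length_cons]
  exact Nat.lt_succ_of_le (List.length_dropWhile_le _ _)

def happyQa_alt (s : String) : Bool :=
  (happyQaRuns s.toList).all (fun p => !(p.1 == 'g') || decide (2 ≤ p.2))

-- ===== PRECONDITION & SPEC =====
def Spec_happyQa (s : String) (out : Bool) : Prop := out = happyQa_alt s
instance (s : String) (out : Bool) : Decidable (Spec_happyQa s out) := by unfold Spec_happyQa; infer_instance

-- ===== CLAIM (what is proved, stated in full; the proofs are below) =====
def Claim_equal_happyQa : Prop := ∀ (s : String), Dom_happyQa s → Spec_happyQa s (happyQa s)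

-- ===== LEMMAS AND PROOFS =====

-- state machine both sides reduce to: pg = "previous char was 'g'"
def chkG (pg : Bool) : List Char → Bool
  | [] => true
  | c :: t =>
      if c = 'g' then
        if pg then chkG true t
        else if t.head? = some 'g' then chkG true t
        else false
      else chkG false t

-- chkG ignores pg when the head is not 'g'
theorem chkG_pg_irrel (q : List Char) (h : q.head? ≠ some 'g') (pg : Bool) :
    chkG pg q = chkG false q := by
  cases q with
  | nil => rfl
  | cons d t =>
      have hd : d ≠ 'g' := by intro h'; exact h (by simp [h'])
      simp [chkG, hd]

-- skipping a block of non-'g' chars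
theorem chkG_append_nong (m r : List Char) (h : ∀ x ∈ m, x ≠ 'g') :
    chkG false (m ++ r) = chkG false r := by
  induction m with
  | nil => rfl
  | cons c m ih =>
      have hc : c ≠ 'g' := h c (by simp)
      simp only [List.cons_append, chkG, if_neg hc]
      exact ih (fun x hx => h x (by simp [hx]))

-- skipping a block of 'g's when pg = true
theorem chkG_append_g (m r : List Char) (h : ∀ x ∈ m, x = 'g') :
    chkG true (m ++ r) = chkG true r := by
  induction m with
  | nil => rfl
  | cons c m ih =>
      have hc : c = 'g' := h c (by simp)
      simp only [List.cons_append, chkG, if_pos hc]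
      simp only [if_true]
      exact ih (fun x hx => h x (by simp [hx]))

-- A's loop computes chkG on the suffix
theorem happyQaLoop_eq_chkG (l : List Char) (i : Nat) :
    happyQaLoop l i = chkG (decide (0 < i ∧ l.getD (i - 1) ' ' = 'g')) (l.drop i) := by
  by_cases hlt : i < l.length
  · have hdrop : l.drop i = l[i] :: l.drop (i + 1) := List.drop_eq_getElem_cons hlt
    have hgd : l.getD i ' ' = l[i] := List.getD_eq_getElem l ' ' hlt
    have ih := happyQaLoop_eq_chkG l (i + 1)
    by_cases hg : l[i] = 'g'
    · by_cases hprev : 0 < i ∧ l.getD (i - 1) ' ' = 'g'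
      · rw [happyQaLoop]
        simp only [if_pos hlt, hgd, if_pos hg, if_pos hprev, ih, hdrop]
        have h1 : decide (0 < i + 1 ∧ l.getD (i + 1 - 1) ' ' = 'g') = true := by
          simp only [Nat.add_sub_cancel, hgd]; simp [hg]
        have h2 : decide (0 < i ∧ l.getD (i - 1) ' ' = 'g') = true := by
          rw [decide_eq_true_iff]; exact hprev
        rw [h1, h2, chkG, if_pos hg, if_pos rfl]
      · have h2 : decide (0 < i ∧ l.getD (i - 1) ' ' = 'g') = false := by
          simpa using hprev
        by_cases hnext : i < l.length - 1 ∧ l.getD (i + 1) ' ' = 'g'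
        · rw [happyQaLoop]
          simp only [if_pos hlt, hgd, if_pos hg, if_neg hprev, if_pos hnext, ih, hdrop]
          have hlt1 : i + 1 < l.length := by omega
          have hhead : (l.drop (i + 1)).head? = some 'g' := by
            rw [List.head?_drop]
            rw [List.getElem?_eq_getElem hlt1]
            rw [← List.getD_eq_getElem l ' ' hlt1, hnext.2]
          have h1 : decide (0 < i + 1 ∧ l.getD (i + 1 - 1) ' ' = 'g') = true := by
            simp only [Nat.add_sub_cancel, hgd]; simp [hg]
          rw [h1, h2, chkG, if_pos hg]
          simp [hhead]
        · rw [happyQaLoop]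
          simp only [if_pos hlt, hgd, if_pos hg, if_neg hprev, if_neg hnext, hdrop]
          have hhead : ¬ (l.drop (i + 1)).head? = some 'g' := by
            rw [List.head?_drop]
            by_cases hlt1 : i + 1 < l.length
            · rw [List.getElem?_eq_getElem hlt1]
              intro hc
              apply hnext
              refine ⟨by omega, ?_⟩
              rw [List.getD_eq_getElem l ' ' hlt1]
              simpa using hc
            · rw [List.getElem?_eq_none (by omega)]; simp
          rw [h2, chkG, if_pos hg]
          rw [if_neg (by simp : ¬ (false = true)), if_neg hhead]
    · rw [happyQaLoop]
      simp only [if_pos hlt, hgd, if_neg hg, ih, hdrop]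
      have h1 : decide (0 < i + 1 ∧ l.getD (i + 1 - 1) ' ' = 'g') = false := by
        simp only [Nat.add_sub_cancel, hgd]; simp [hg]
      rw [h1, chkG, if_neg hg]
  · have hnil : l.drop i = [] := List.drop_eq_nil_of_le (by omega)
    rw [happyQaLoop]
    simp [if_neg hlt, hnil, chkG]
termination_by l.length - i
decreasing_by omega

-- an isolated 'g' fails
theorem chkG_g_iso (r : List Char) (hr : ¬ r.head? = some 'g') :
    chkG false ('g' :: r) = false := by
  rw [chkG, if_pos rfl, if_neg (by simp : ¬ (false = true)), if_neg hr]

-- a 'g'-run of length ≥ 2 passes and disappears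
theorem chkG_g_run (m r : List Char) (h : ∀ x ∈ m, x = 'g') (hm : m ≠ [])
    (hr : ¬ r.head? = some 'g') :
    chkG false ('g' :: m ++ r) = chkG false r := by
  obtain ⟨d, p', rfl⟩ := List.exists_cons_of_ne_nil hm
  have hd : d = 'g' := h d (by simp)
  rw [List.cons_append, chkG, if_pos rfl, if_neg (by simp : ¬ (false = true)),
    if_pos (by simp [hd] : ((d :: p' ++ r).head? = some 'g'))]
  exact (chkG_append_g (d :: p') r h).trans (chkG_pg_irrel r hr true)

-- B's run check equals the state machine
theorem runs_eq_chkG (l : List Char) :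
    ((happyQaRuns l).all (fun p => !(p.1 == 'g') || decide (2 ≤ p.2))) = chkG false l := by
  match l with
  | [] => simp [happyQaRuns, chkG]
  | c :: rest =>
    have hsplit : rest.takeWhile (· == c) ++ rest.dropWhile (· == c) = rest :=
      List.takeWhile_append_dropWhile
    have htake : ∀ x ∈ rest.takeWhile (· == c), x = c := fun x hx => by
      simpa using List.mem_takeWhile_imp hx
    have ih := runs_eq_chkG (rest.dropWhile (· == c))
    have hq : ∀ d t, rest.dropWhile (· == c) = d :: t → d ≠ c := by
      intro d t hdt hc2
      have hne : rest.dropWhile (· == c) ≠ [] := by simp [hdt]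
      have h1 := List.head_dropWhile_not (· == c) (l := rest) hne
      have hd : (rest.dropWhile (· == c)).head hne = d := by simp [hdt]
      rw [hd] at h1
      simp [hc2] at h1
    have hqh : ¬ (rest.dropWhile (· == c)).head? = some c := by
      rcases hdw : rest.dropWhile (· == c) with _ | ⟨e, t⟩
      · simp
      · have := hq e t hdw
        simp [this]
    rw [happyQaRuns]
    simp only [List.all_cons, ih]
    by_cases hg : c = 'g'
    · subst hg
      rcases htw : rest.takeWhile (· == 'g') with _ | ⟨d, p'⟩
      · -- isolated 'g': the rest starts with a non-'g' char (or is empty)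
        have hdw : rest.dropWhile (· == 'g') = rest := by
          conv_rhs => rw [← hsplit, htw]
          simp
        rw [hdw] at hqh
        rw [chkG_g_iso rest hqh]
        simp
      · -- run of length ≥ 2
        have hall : ∀ x ∈ d :: p', x = 'g' := by rw [← htw]; exact fun x hx => htake x hx
        have hrest : rest = (d :: p') ++ rest.dropWhile (· == 'g') := by
          rw [← htw, hsplit]
        conv_rhs => rw [hrest]
        have hrun := chkG_g_run (d :: p') (rest.dropWhile (· == 'g')) hall (by simp) hqh
        simp only [List.cons_append] at hrun ⊢
        rw [hrun]
        simp
    · -- a non-'g' run contributes nothing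
      have hbc : (!(c == 'g') || decide (2 ≤ (rest.takeWhile (· == c)).length + 1)) = true := by
        simp [hg]
      rw [hbc, chkG, if_neg hg, ← hsplit,
        chkG_append_nong _ _ (fun x hx => by rw [htake x hx]; exact hg)]
      simp
termination_by l.length
decreasing_by
  simp only [List.length_cons]
  exact Nat.lt_succ_of_le (List.length_dropWhile_le _ _)

-- ===== VERDICT (by name: the statement is the Claim_ definition above) =====
theorem happyQa_spec : Claim_equal_happyQa := by
  intro s _
  unfold Spec_happyQa happyQa happyQa_alt
  rw [runs_eq_chkG]
  simpa using happyQaLoop_eq_chkG s.toList 0
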